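-- pv_equiv track=rewrite | github.com/feiqiuaaaa/RAGFL | complie_contracts/extract_slice_by_ast.py | src_to_line_numbers
-- ===== SOURCE A (Python) =====
-- import bisect
--
-- def src_to_line_numbers(start, length, content: str):
--     # 生成行偏移量列表（每行的起始字符位置）
--     line_offsets = [0]
--     for i, c in enumerate(content):
--         if c == '\n':
--             line_offsets.append(i + 1)
--
--     # 计算字符位置范围
--     start_pos = start
--     end_pos = start_pos + length - 1  # 包含结束位置
--
--     # 处理超出文件末尾的情况
--     max_pos = len(content) - 1
--     if end_pos > max_pos:
--         end_pos = max_pos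
--
--     # 查找对应的行号
--     start_line_idx = bisect.bisect_right(line_offsets, start_pos) - 1
--     end_line_idx = bisect.bisect_right(line_offsets, end_pos) - 1
--
--     # 转换为从1开始的行号
--     return start_line_idx + 1, end_line_idx + 1
-- ===== SOURCE B (Python) =====
-- def src_to_line_numbers(start, length, content: str):
--     def line_no(p):
--         if p < 0:
--             return 0
--         return content.count('\n', 0, p) + 1
--
--     end = start + length - 1
--     max_pos = len(content) - 1
--     if end > max_pos:
--         end = max_pos
--     return line_no(start), line_no(end)
-- ===== Notes on version B (the rewrite author's own statement) =====
-- stated objective: faster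
-- what changed: Replaces the Python-level loop building a line-offset list plus bisect with two direct newline counts via str.count('\n',0,p) (line = count+1, positions below 0 give line 0); measured ~10x faster since counting runs in C with no intermediate list.
import Mathlib
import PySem

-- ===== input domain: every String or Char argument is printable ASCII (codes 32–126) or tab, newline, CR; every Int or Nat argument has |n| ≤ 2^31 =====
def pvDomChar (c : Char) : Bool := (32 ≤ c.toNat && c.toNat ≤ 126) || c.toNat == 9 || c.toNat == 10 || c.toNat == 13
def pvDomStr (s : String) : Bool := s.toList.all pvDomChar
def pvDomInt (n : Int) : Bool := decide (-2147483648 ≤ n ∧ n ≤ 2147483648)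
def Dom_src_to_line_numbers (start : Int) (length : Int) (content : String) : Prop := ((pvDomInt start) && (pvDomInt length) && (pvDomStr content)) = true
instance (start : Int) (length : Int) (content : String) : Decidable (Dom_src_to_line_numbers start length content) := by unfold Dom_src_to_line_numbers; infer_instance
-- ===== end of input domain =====

-- B replaces the offset list + bisect with two direct newline counts; objective: simpler.

-- ===== PORT A =====
-- bisect.bisect_right on a sorted list = number of elements ≤ x (exact contract of the stdlib call;
-- line_offsets is strictly increasing by construction).
def bisectRight (xs : List Int) (x : Int) : Int :=
  (xs.countP (fun o => o ≤ x) : Nat)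

def src_to_line_numbers (start : Int) (length : Int) (content : String) : Int × Int :=
  let line_offsets : List Int :=
    (PySem.List.enumerate content.toList 0).foldl
      (fun acc ic => if ic.2 = '\n' then acc ++ [ic.1 + 1] else acc) [0]
  let start_pos := start
  let end_pos := start_pos + length - 1
  let max_pos : Int := (content.toList.length : Int) - 1
  let end_pos := if end_pos > max_pos then max_pos else end_pos
  let start_line_idx := bisectRight line_offsets start_pos - 1
  let end_line_idx := bisectRight line_offsets end_pos - 1
  (start_line_idx + 1, end_line_idx + 1)

-- ===== PORT B =====
-- content.count('\n', 0, p) with p ≥ 0 counts the newlines among the first p characters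
-- (Python clamps p to len(content)); List.take clamps identically, so this is exact.
def lineNoB (content : String) (p : Int) : Int :=
  if p < 0 then 0
  else ((content.toList.take p.toNat).count '\n' : Nat) + 1

def src_to_line_numbers_alt (start : Int) (length : Int) (content : String) : Int × Int :=
  let endp := start + length - 1
  let max_pos : Int := (content.toList.length : Int) - 1
  let endp := if endp > max_pos then max_pos else endp
  (lineNoB content start, lineNoB content endp)

-- ===== PRECONDITION & SPEC =====
def Spec_src_to_line_numbers (start : Int) (length : Int) (content : String) (out : Int × Int) : Prop := out = src_to_line_numbers_alt start length content
instance (start : Int) (length : Int) (content : String) (out : Int × Int) : Decidable (Spec_src_to_line_numbers start length content out) := by unfold Spec_src_to_line_numbers; infer_instance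

-- ===== CLAIM (what is proved, stated in full; the proofs are below) =====
def Claim_equal_src_to_line_numbers : Prop := ∀ (start : Int) (length : Int) (content : String), Dom_src_to_line_numbers start length content → Spec_src_to_line_numbers start length content (src_to_line_numbers start length content)

-- ===== LEMMAS AND PROOFS =====

-- the newline offsets (i+1 for each newline at absolute index i), starting at index k
def nlOffs (k : Int) : List Char → List Int
  | [] => []
  | c :: cs => (if c = '\n' then [k + 1] else []) ++ nlOffs (k + 1) cs

theorem foldl_nl (cs : List Char) : ∀ (k : Int) (acc : List Int),
    (PySem.List.enumerate cs k).foldl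
      (fun acc ic => if ic.2 = '\n' then acc ++ [ic.1 + 1] else acc) acc
      = acc ++ nlOffs k cs := by
  induction cs with
  | nil => intro k acc; simp [PySem.List.enumerate_nil, nlOffs]
  | cons c cs ih =>
      intro k acc
      simp only [PySem.List.enumerate_cons, List.foldl_cons, nlOffs]
      by_cases h : c = '\n' <;> simp [h, ih, List.append_assoc]

theorem countP_nlOffs (cs : List Char) : ∀ (k p : Int),
    (nlOffs k cs).countP (fun o => decide (o ≤ p)) = (cs.take (p - k).toNat).count '\n' := by
  induction cs with
  | nil => intro k p; simp [nlOffs]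
  | cons c cs ih =>
      intro k p
      simp only [nlOffs, List.countP_append]
      by_cases hp : p ≤ k
      · have h0 : (p - k).toNat = 0 := by omega
        have h1 : (p - (k + 1)).toNat = 0 := by omega
        have := ih (k + 1) p
        rw [h1] at this
        simp only [h0, List.take_zero, List.count_nil]
        by_cases h : c = '\n' <;>
          simp_all [show ¬(k + 1 ≤ p) by omega]
      · have h0 : (p - k).toNat = (p - (k + 1)).toNat + 1 := by omega
        rw [h0, List.take_succ_cons]
        have := ih (k + 1) p
        by_cases h : c = '\n'
        · simp_all [show (k + 1 ≤ p) by omega]; omega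
        · simp_all [show (k + 1 ≤ p) by omega]

-- one position: A's bisect-based line number equals B's count-based one
theorem line_eq (content : String) (p : Int) :
    bisectRight
      ((PySem.List.enumerate content.toList 0).foldl
        (fun acc ic => if ic.2 = '\n' then acc ++ [ic.1 + 1] else acc) [0]) p
      - 1 + 1 = lineNoB content p := by
  rw [foldl_nl]
  unfold bisectRight lineNoB
  simp only [List.countP_append]
  have h := countP_nlOffs content.toList 0 p
  by_cases hp : p < 0
  · have h0 : (p - 0).toNat = 0 := by omega
    rw [h0] at h
    simp_all [show ¬(0 ≤ p) by omega]
  · have h0 : (p - 0).toNat = p.toNat := by omega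
    rw [h0] at h
    simp_all [show (0 ≤ p) by omega]

-- ===== VERDICT (by name: the statement is the Claim_ definition above) =====
theorem src_to_line_numbers_spec : Claim_equal_src_to_line_numbers := by
  intro start length content _
  unfold Spec_src_to_line_numbers src_to_line_numbers src_to_line_numbers_alt
  simp only []
  refine Prod.ext ?_ ?_ <;> simp only [line_eq]
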